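-- pv_equiv track=rewrite | github.com/Kv1566/permTest | permTest.py | pList3
-- ===== SOURCE A (Python) =====
-- from functools import reduce
--
-- def allRotated(list):
--     def rotatedTo(i):
--         return [list[i]] + list[0:i] + list[i + 1:]
--     return [rotatedTo(i) for i in range(len(list))]
--
-- def perm(list):
--     if list == []:
--         return [[]]
--     else:
--         lts = allRotated(list)
--         return reduce(lambda a, b: a + b,
--             [[[lt[0]] + pl for pl in perm(lt[1:])] for lt in lts])
--
-- def pList3(sum, myList):
--     tmpListADE = []
--     for i in range(0, len(myList)-2):
--         for j in range(i+1, len(myList)-1):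
--             for k in range(j+1, len(myList)):
--                 if myList[i]+myList[j]+myList[k] == sum:
--                     for list in perm([myList[i], myList[j], myList[k]]):
--                         tmpListADE.append(list)
--     return tmpListADE
-- ===== SOURCE B (Python) =====
-- def pList3(sum, myList):
--     pos = {}
--     for idx, v in enumerate(myList):
--         pos.setdefault(v, []).append(idx)
--     out = []
--     n = len(myList)
--     for i in range(0, n - 2):
--         a = myList[i]
--         for j in range(i + 1, n - 1):
--             b = myList[j]
--             c = sum - a - b
--             for k in pos.get(c, []):
--                 if k > j:
--                     out.extend([[a, b, c], [a, c, b], [b, a, c],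
--                                 [b, c, a], [c, a, b], [c, b, a]])
--     return out
-- ===== Notes on version B (the rewrite author's own statement) =====
-- stated objective: faster
-- what changed: B builds a value-to-sorted-index-list dict once and, for each pair (i,j), looks up only the indices holding the needed third value (emitting the 6 permutations inline) instead of A's scan over every k and recursive perm computation.
import Mathlib
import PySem

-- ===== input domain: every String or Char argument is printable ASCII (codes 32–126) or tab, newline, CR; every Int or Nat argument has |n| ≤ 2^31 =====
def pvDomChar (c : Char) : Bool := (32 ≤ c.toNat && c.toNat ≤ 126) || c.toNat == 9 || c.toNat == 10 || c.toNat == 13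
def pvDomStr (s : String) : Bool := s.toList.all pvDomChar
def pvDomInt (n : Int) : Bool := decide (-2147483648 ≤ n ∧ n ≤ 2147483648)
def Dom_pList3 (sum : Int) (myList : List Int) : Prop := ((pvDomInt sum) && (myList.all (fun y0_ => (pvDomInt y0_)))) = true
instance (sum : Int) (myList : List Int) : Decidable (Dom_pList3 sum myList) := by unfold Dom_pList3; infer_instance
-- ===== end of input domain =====

-- B replaces A's innermost scan over all k by a lookup in a value→indices dict built once,
-- and inlines the 6 permutations of a 3-element list.

-- ===== PORT A =====
-- rotatedTo i = [list[i]] + list[0:i] + list[i+1:]  ([list[i]] via pyGet?; i always in range here,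
-- so the Option is always some and .toList is exactly the singleton Python builds)
def allRotated (l : List Int) : List (List Int) :=
  (PySem.List.pyRange 0 (l.length : Int)).map (fun i =>
    (PySem.List.pyGet? l i).toList ++ PySem.List.slice l (some 0) (some i) ++
      PySem.List.slice l (some (i + 1)) none)

-- perm, with a fuel parameter that only makes the same recursion total (fuel = length + 1
-- always suffices: the recursive call is on lt[1:], one element shorter).  reduce(+) over the
-- nonempty list lts is foldl (++) over head/tail; the [] match arm is unreachable.
def permF : Nat → List Int → List (List Int)
  | 0, _ => []
  | fuel + 1, l =>
    if l = [] then [[]]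
    else
      match (allRotated l).map (fun lt =>
          (permF fuel (PySem.List.slice lt (some 1) none)).map
            (fun pl => (PySem.List.pyGet? lt 0).toList ++ pl)) with
      | [] => []
      | x :: xs => xs.foldl (· ++ ·) x

def perm (l : List Int) : List (List Int) := permF (l.length + 1) l

def pList3 (sum : Int) (myList : List Int) : List (List Int) :=
  (PySem.List.pyRange 0 ((myList.length : Int) - 2)).foldl (fun acc i =>
    (PySem.List.pyRange (i + 1) ((myList.length : Int) - 1)).foldl (fun acc j =>
      (PySem.List.pyRange (j + 1) (myList.length : Int)).foldl (fun acc k =>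
        if PySem.List.pyGetD myList i 0 + PySem.List.pyGetD myList j 0 +
            PySem.List.pyGetD myList k 0 = sum then
          acc ++ perm [PySem.List.pyGetD myList i 0, PySem.List.pyGetD myList j 0,
                       PySem.List.pyGetD myList k 0]
        else acc) acc) acc) []

-- ===== PORT B =====
-- pos.setdefault(v, []).append(idx): overwrite-in-place insert of the extended index list
def buildPos (myList : List Int) : PySem.Dict Int (List Int) :=
  (PySem.List.enumerate myList).foldl
    (fun d p => d.insert p.2 (d.getD p.2 [] ++ [p.1])) ∅

def pList3_alt (sum : Int) (myList : List Int) : List (List Int) :=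
  let pos := buildPos myList
  let n : Int := myList.length
  (PySem.List.pyRange 0 (n - 2)).foldl (fun acc i =>
    let a := PySem.List.pyGetD myList i 0
    (PySem.List.pyRange (i + 1) (n - 1)).foldl (fun acc j =>
      let b := PySem.List.pyGetD myList j 0
      let c := sum - a - b
      (pos.getD c []).foldl (fun acc k =>
        if k > j then
          acc ++ [[a, b, c], [a, c, b], [b, a, c], [b, c, a], [c, a, b], [c, b, a]]
        else acc) acc) acc) []

-- ===== PRECONDITION & SPEC =====
def Spec_pList3 (sum : Int) (myList : List Int) (out : List (List Int)) : Prop := out = pList3_alt sum myList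
instance (sum : Int) (myList : List Int) (out : List (List Int)) : Decidable (Spec_pList3 sum myList out) := by unfold Spec_pList3; infer_instance

-- ===== CLAIM (what is proved, stated in full; the proofs are below) =====
def Claim_equal_pList3 : Prop := ∀ (sum : Int) (myList : List Int), Dom_pList3 sum myList → Spec_pList3 sum myList (pList3 sum myList)

-- ===== LEMMAS AND PROOFS =====

-- evaluating A's perm on lists of length ≤ 3 (any sufficient fuel)
theorem allRot1 (x : Int) : allRotated [x] = [[x]] := by
  show (PySem.List.pyRange 0 ((1:Nat) : Int)).map _ = _
  rw [show (((1:Nat)):Int) = 1 from rfl, show PySem.List.pyRange 0 1 = [0] from rfl]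
  show [_] = _; rfl

theorem allRot2 (x y : Int) : allRotated [x,y] = [[x,y],[y,x]] := by
  show (PySem.List.pyRange 0 ((2:Nat) : Int)).map _ = _
  rw [show (((2:Nat)):Int) = 2 from rfl, show PySem.List.pyRange 0 2 = [0,1] from rfl]
  show [_,_] = _; rfl

theorem allRot3 (x y z : Int) : allRotated [x,y,z] = [[x,y,z],[y,x,z],[z,x,y]] := by
  show (PySem.List.pyRange 0 ((3:Nat) : Int)).map _ = _
  rw [show (((3:Nat)):Int) = 3 from rfl, show PySem.List.pyRange 0 3 = [0,1,2] from rfl]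
  show [_,_,_] = _; rfl

theorem sliceTail1 (x : Int) : PySem.List.slice [x] (some 1) none = [] := rfl
theorem sliceTail2 (x y : Int) : PySem.List.slice [x,y] (some 1) none = [y] := rfl
theorem sliceTail3 (x y z : Int) : PySem.List.slice [x,y,z] (some 1) none = [y,z] := rfl

theorem permF_nil (f : Nat) : permF (f+1) [] = [[]] := rfl

theorem permF1 (f : Nat) (x : Int) : permF (f+2) [x] = [[x]] := by
  rw [permF, if_neg (by simp), allRot1]
  simp only [List.map, sliceTail1, permF_nil]
  simp [PySem.List.pyGet?, PySem.List.pyIdx?]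

theorem permF2 (f : Nat) (x y : Int) : permF (f+3) [x,y] = [[x,y],[y,x]] := by
  rw [permF, if_neg (by simp), allRot2]
  simp only [List.map, sliceTail2, permF1]
  simp [PySem.List.pyGet?, PySem.List.pyIdx?]

theorem permF3 (f : Nat) (x y z : Int) :
    permF (f+4) [x,y,z] = [[x,y,z],[x,z,y],[y,x,z],[y,z,x],[z,x,y],[z,y,x]] := by
  rw [permF, if_neg (by simp), allRot3]
  simp only [List.map, sliceTail3, permF2]
  simp [PySem.List.pyGet?, PySem.List.pyIdx?]

-- A's perm of a 3-element list is exactly the 6 permutations, in A's order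
theorem perm_three (a b c : Int) :
    perm [a, b, c] = [[a,b,c],[a,c,b],[b,a,c],[b,c,a],[c,a,b],[c,b,a]] := permF3 0 a b c

-- the dict built by B maps v to the ascending list of indices holding v
theorem buildPos_getD (myList : List Int) (v : Int) :
    (buildPos myList).getD v [] =
      (PySem.List.pyRange 0 (myList.length : Int)).filter
        (fun k => PySem.List.pyGetD myList k 0 == v) := by
  induction myList using List.reverseRecOn with
  | nil => rfl
  | append_singleton l x ih =>
    unfold buildPos
    rw [PySem.List.enumerate_append, List.foldl_append]
    simp only [List.length_append, List.length_cons, List.length_nil]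
    rw [show PySem.List.enumerate [x] (0 + (l.length : Int)) = [((l.length : Int), x)] by
      simp [PySem.List.enumerate]]
    simp only [List.foldl_cons, List.foldl_nil]
    rw [PySem.Dict.getD_insert]
    have hcast : ((l.length + (0 + 1) : Nat) : Int) = (l.length : Int) + 1 := by push_cast; ring
    rw [hcast, PySem.List.pyRange_one_succ_right (by positivity), List.filter_append]
    have hfiltr : (PySem.List.pyRange 0 (l.length : Int)).filter
        (fun k => PySem.List.pyGetD (l ++ [x]) k 0 == v)
        = (PySem.List.pyRange 0 (l.length : Int)).filter
        (fun k => PySem.List.pyGetD l k 0 == v) := by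
      apply List.filter_congr
      intro k hk
      have hb := PySem.List.mem_pyRange_one.mp hk
      rw [PySem.List.pyGetD_eq_getElem (l ++ [x]) 0 hb.1 (by simp; omega),
          PySem.List.pyGetD_eq_getElem l 0 hb.1 (by exact_mod_cast hb.2),
          List.getElem_append_left]
    have hlast : PySem.List.pyGetD (l ++ [x]) (l.length : Int) 0 = x := by
      rw [PySem.List.pyGetD_natCast]
      simp
    rw [hfiltr, ← buildPos, ih]
    by_cases hv : v = x
    · subst hv
      rw [if_pos rfl]
      simp [hlast, ih]
    · rw [if_neg hv]
      simp [hlast]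
      exact fun h => hv h.symm

-- pyRange (j+1) n is the part of pyRange 0 n above j (for 0 ≤ j)
theorem pyRange_succ_filter (j n : Int) (hj : 0 ≤ j) :
    PySem.List.pyRange (j + 1) n =
      (PySem.List.pyRange 0 n).filter (fun k => decide (j < k)) := by
  by_cases hn : j + 1 ≤ n
  · rw [PySem.List.pyRange_one_append 0 (j+1) n (by omega) hn, List.filter_append]
    rw [List.filter_eq_nil_iff.mpr, List.filter_eq_self.mpr, List.nil_append]
    · intro k hk
      have := PySem.List.mem_pyRange_one.mp hk
      simp; omega
    · intro k hk
      have := PySem.List.mem_pyRange_one.mp hk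
      simp; omega
  · have h1 : PySem.List.pyRange (j+1) n = [] := by
      rw [List.eq_nil_iff_forall_not_mem]
      intro k hk
      have := PySem.List.mem_pyRange_one.mp hk
      omega
    rw [h1]
    symm
    rw [List.filter_eq_nil_iff]
    intro k hk
    have := PySem.List.mem_pyRange_one.mp hk
    simp; omega

-- loop shape: a conditional-append foldl is acc ++ flatMap over the filtered list
theorem foldl_if_append {α β : Type} (p : α → Prop) [DecidablePred p] (g : α → List β)
    (l : List α) (acc : List β) :
    l.foldl (fun acc x => if p x then acc ++ g x else acc) acc
      = acc ++ (l.filter (fun x => decide (p x))).flatMap g := by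
  rw [← PySem.List.foldl_append_eq_flatMap, List.foldl_filter]
  simp only [decide_eq_true_eq]

theorem pList3_spec' (sum : Int) (myList : List Int) :
    pList3 sum myList = pList3_alt sum myList := by
  simp only [pList3, pList3_alt]
  apply PySem.List.foldl_congr_mem
  intro acc0 i hi
  apply PySem.List.foldl_congr_mem
  intro acc j hj
  have hi0 : 0 ≤ i := (PySem.List.mem_pyRange_one.mp hi).1
  have hj0 : 0 ≤ j := by have := (PySem.List.mem_pyRange_one.mp hj).1; omega
  rw [foldl_if_append (fun k => PySem.List.pyGetD myList i 0 + PySem.List.pyGetD myList j 0 +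
        PySem.List.pyGetD myList k 0 = sum),
      foldl_if_append (fun k => k > j)]
  rw [pyRange_succ_filter j _ hj0, buildPos_getD, List.filter_filter, List.filter_filter]
  set a := PySem.List.pyGetD myList i 0 with ha
  set b := PySem.List.pyGetD myList j 0 with hb
  have hfeq : (PySem.List.pyRange 0 (myList.length : Int)).filter
        (fun k => decide (a + b + PySem.List.pyGetD myList k 0 = sum) && decide (j < k))
      = (PySem.List.pyRange 0 (myList.length : Int)).filter
        (fun k => decide (k > j) && (PySem.List.pyGetD myList k 0 == sum - a - b)) := by
    apply List.filter_congr
    intro k _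
    rw [Bool.eq_iff_iff]
    simp
    omega
  rw [hfeq]
  congr 1
  apply List.flatMap_congr
  intro k hk
  have hc : PySem.List.pyGetD myList k 0 = sum - a - b := by
    have := List.of_mem_filter hk
    simp at this
    exact this.2
  rw [hc, perm_three]

-- ===== VERDICT (by name: the statement is the Claim_ definition above) =====
theorem pList3_spec : Claim_equal_pList3 := by
  intro s l _
  unfold Spec_pList3
  exact pList3_spec' s l
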